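-- pv_equiv track=rewrite | github.com/rmartinshort/text_chunking | text_chunking/SemanticClusterVisualizer.py | merge_short_documents
-- ===== SOURCE A (Python) =====
-- from typing import List, Tuple, Dict, Any
--
-- def merge_short_documents(split_texts: List[str], min_len: int = 100) -> List[str]:
--     """
--     Merges short documents into preceding documents to prevent incorrect classification.
--
--     Args:
--         split_texts (List[str]): A list of split text documents.
--         min_len (int, optional): Minimum length for a document to avoid merging. Defaults to 100.
--
--     Returns:
--         List[str]: A list of merged document chunks.
--     """
--     merged_splits = []
--     for text in split_texts:
--         if merged_splits and (len(text) < min_len):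
--             last_text = merged_splits.pop()
--             merged_splits.append(last_text + " " + text)
--         else:
--             merged_splits.append(text)
--
--     return merged_splits
-- ===== SOURCE B (Python) =====
-- def merge_short_documents(split_texts, min_len=100):
--     """Run-based rewrite: scan with two indices, each output chunk is a maximal
--     run [i:j] = one long-enough (or leading) text followed by its short
--     followers, joined once per run."""
--     out = []
--     n = len(split_texts)
--     i = 0
--     while i < n:
--         j = i + 1
--         while j < n and len(split_texts[j]) < min_len:
--             j += 1
--         out.append(" ".join(split_texts[i:j]))
--         i = j
--     return out
-- ===== Notes on version B (the rewrite author's own statement) =====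
-- stated objective: faster
-- what changed: B is a two-index run scanner: an inner scan finds the end j of each maximal run (a text followed by its short successors), the run slice is joined once, and the outer index jumps to j; A instead folds text-by-text over the result list, popping and re-concatenating the growing last chunk for every short text.
import Mathlib
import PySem

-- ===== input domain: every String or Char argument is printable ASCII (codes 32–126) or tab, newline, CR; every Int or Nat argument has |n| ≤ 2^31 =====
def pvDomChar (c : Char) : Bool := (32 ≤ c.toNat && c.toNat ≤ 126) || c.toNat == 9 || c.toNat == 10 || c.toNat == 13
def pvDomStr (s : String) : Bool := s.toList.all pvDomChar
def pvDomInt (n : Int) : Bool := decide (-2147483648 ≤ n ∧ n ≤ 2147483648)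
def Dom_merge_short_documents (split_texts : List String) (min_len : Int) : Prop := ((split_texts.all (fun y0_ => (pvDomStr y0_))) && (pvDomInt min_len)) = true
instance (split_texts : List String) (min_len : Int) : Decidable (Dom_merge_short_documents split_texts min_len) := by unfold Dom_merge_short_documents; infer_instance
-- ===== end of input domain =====

-- B scans maximal runs with two indices and joins each run slice once, instead of A's fold that pops and re-concatenates the growing last chunk; objective: faster.

-- ===== PORT A =====
-- literal transliteration: merged_splits accumulator; pop = dropLast/getLast!
def merge_short_documents (split_texts : List String) (min_len : Int) : List String :=
  split_texts.foldl (fun merged_splits text =>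
    if merged_splits ≠ [] ∧ PySem.Str.len text < min_len then
      merged_splits.dropLast ++ [merged_splits.getLast! ++ " " ++ text]
    else
      merged_splits ++ [text]) []

-- ===== PORT B =====
-- outer while loop = recursion consuming one run per step;
-- inner while loop (advance j over short texts) = takeWhile, its stop index j = i + 1 + run.length;
-- split_texts[i:j] joined once per run.
def pvMergeRuns (l : List String) (min_len : Int) : List String :=
  match l with
  | [] => []
  | t :: rest =>
    let run := rest.takeWhile (fun s => PySem.Str.len s < min_len)
    PySem.Str.join " " (t :: run) :: pvMergeRuns (rest.drop run.length) min_len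
termination_by l.length
decreasing_by
  simp

def merge_short_documents_alt (split_texts : List String) (min_len : Int) : List String :=
  pvMergeRuns split_texts min_len

-- ===== PRECONDITION & SPEC =====
def Spec_merge_short_documents (split_texts : List String) (min_len : Int) (out : List String) : Prop := out = merge_short_documents_alt split_texts min_len
instance (split_texts : List String) (min_len : Int) (out : List String) : Decidable (Spec_merge_short_documents split_texts min_len out) := by unfold Spec_merge_short_documents; infer_instance

-- ===== CLAIM (what is proved, stated in full; the proofs are below) =====
def Claim_equal_merge_short_documents : Prop := ∀ (split_texts : List String) (min_len : Int), Dom_merge_short_documents split_texts min_len → Spec_merge_short_documents split_texts min_len (merge_short_documents split_texts min_len)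

-- ===== LEMMAS AND PROOFS =====

lemma str_join_singleton (t : String) : PySem.Str.join " " [t] = t := by
  apply String.toList_inj.mp
  simp [PySem.Str.toList_join, PySem.Chars.join_singleton]

lemma chars_join_append_singleton (sep t : List Char) :
    ∀ g : List (List Char), g ≠ [] →
      PySem.Chars.join sep (g ++ [t]) = PySem.Chars.join sep g ++ sep ++ t
  | [], h => absurd rfl h
  | [p], _ => by
      simp [PySem.Chars.join_cons_cons, PySem.Chars.join_singleton]
  | p :: q :: rest, _ => by
      have ih := chars_join_append_singleton sep t (q :: rest) (by simp)
      simp only [List.cons_append] at ih ⊢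
      rw [PySem.Chars.join_cons_cons, PySem.Chars.join_cons_cons, ih]
      simp [List.append_assoc]

-- joining a run extended on the right = re-concatenating the last merged chunk
lemma join_append_singleton (g : List String) (t : String) (h : g ≠ []) :
    PySem.Str.join " " (g ++ [t]) = PySem.Str.join " " g ++ " " ++ t := by
  apply String.toList_inj.mp
  simp only [PySem.Str.toList_join, List.map_append, List.map_cons, List.map_nil,
    String.toList_append]
  exact chars_join_append_singleton _ _ (g.map String.toList) (by simpa using h)

lemma drop_length_takeWhile {α : Type} (p : α → Bool) (l : List α) :
    l.drop (l.takeWhile p).length = l.dropWhile p := by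
  induction l with
  | nil => simp
  | cons a l ih =>
    by_cases hp : p a
    · simp [hp, ih]
    · simp [hp]

lemma mergeRuns_cons (t : String) (rest : List String) (min_len : Int) :
    pvMergeRuns (t :: rest) min_len
      = PySem.Str.join " " (t :: rest.takeWhile (fun s => PySem.Str.len s < min_len))
        :: pvMergeRuns (rest.dropWhile (fun s => PySem.Str.len s < min_len)) min_len := by
  rw [pvMergeRuns, drop_length_takeWhile]

-- A's loop, started with a pending current run, finishes that run with the following
-- short texts and then emits one chunk per remaining maximal run
lemma loop_eq (min_len : Int) (ts : List String) (acc : List String)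
    (cur : List String) (h : cur ≠ []) :
    ts.foldl (fun merged_splits text =>
      if merged_splits ≠ [] ∧ PySem.Str.len text < min_len then
        merged_splits.dropLast ++ [merged_splits.getLast! ++ " " ++ text]
      else
        merged_splits ++ [text]) (acc ++ [PySem.Str.join " " cur])
    = acc ++ (PySem.Str.join " " (cur ++ ts.takeWhile (fun s => PySem.Str.len s < min_len))
        :: pvMergeRuns (ts.dropWhile (fun s => PySem.Str.len s < min_len)) min_len) := by
  induction ts generalizing acc cur with
  | nil => simp [pvMergeRuns]
  | cons t ts ih =>
    simp only [List.foldl_cons]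
    by_cases hlen : PySem.Str.len t < min_len
    all_goals simp only [PySem.Str.len, String.length_toList] at hlen
    · rw [if_pos ⟨by simp, hlen⟩]
      have hstate : (acc ++ [PySem.Str.join " " cur]).dropLast ++
          [(acc ++ [PySem.Str.join " " cur]).getLast! ++ " " ++ t]
          = acc ++ [PySem.Str.join " " (cur ++ [t])] := by
        simp [join_append_singleton cur t h]
      rw [hstate, ih acc (cur ++ [t]) (by simp)]
      simp [hlen]
    · rw [if_neg (by simp [hlen])]
      have hstate : (acc ++ [PySem.Str.join " " cur]) ++ [t]
          = (acc ++ [PySem.Str.join " " cur]) ++ [PySem.Str.join " " [t]] := by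
        rw [str_join_singleton]
      rw [hstate, ih (acc ++ [PySem.Str.join " " cur]) [t] (by simp)]
      simp [hlen, mergeRuns_cons]

-- ===== VERDICT (by name: the statement is the Claim_ definition above) =====
theorem merge_short_documents_spec : Claim_equal_merge_short_documents := by
  intro split_texts min_len _
  unfold Spec_merge_short_documents merge_short_documents merge_short_documents_alt
  cases split_texts with
  | nil => simp [pvMergeRuns]
  | cons t ts =>
    have h0 : ([t] : List String) = [] ++ [PySem.Str.join " " [t]] := by
      simp [str_join_singleton]
    simp only [List.foldl_cons, ne_eq, not_true_eq_false, false_and, if_false,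
      List.nil_append]
    rw [show ([t] : List String) = [] ++ [PySem.Str.join " " [t]] from h0,
      loop_eq min_len ts [] [t] (by simp), mergeRuns_cons]
    simp
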